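-- pv_equiv track=rewrite | github.com/miliar/Code_Jam_Webscraper | solutions_python/solutions_year17_round0_nr3/577.py | iteration_num
-- ===== SOURCE A (Python) =====
-- def iteration_num(k):
--     ans=0
--     n=1
--     while True:
--         k=k-n
--         if k<=0:
--             break
--         else:
--             ans+=1
--             n=n*2
--     return ans
-- ===== SOURCE B (Python) =====
-- def iteration_num(k):
--     if k <= 1:
--         return 0
--     return k.bit_length() - 1
-- ===== Notes on version B (the rewrite author's own statement) =====
-- stated objective: simpler
-- what changed: Replaced the subtract-1,2,4,... loop with the closed form bit_length(k)-1 (= floor(log2 k)) for k >= 2, and 0 otherwise.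
import Mathlib
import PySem

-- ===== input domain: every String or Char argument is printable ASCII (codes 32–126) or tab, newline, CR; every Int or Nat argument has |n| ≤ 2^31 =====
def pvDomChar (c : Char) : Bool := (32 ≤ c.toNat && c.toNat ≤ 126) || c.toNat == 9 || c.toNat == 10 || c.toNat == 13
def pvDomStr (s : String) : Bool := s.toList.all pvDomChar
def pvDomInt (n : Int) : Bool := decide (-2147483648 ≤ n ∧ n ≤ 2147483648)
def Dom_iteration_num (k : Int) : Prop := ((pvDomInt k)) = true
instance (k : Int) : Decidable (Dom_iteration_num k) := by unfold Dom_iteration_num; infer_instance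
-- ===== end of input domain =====

-- B replaces A's subtract-1,2,4,… loop by the closed form bit_length(k)-1 (= floor(log2 k)) for k ≥ 2, else 0: simpler, no loop.

-- ===== PORT A =====
-- A's while-True loop: subtract n, break if k ≤ 0, else ans += 1, n *= 2.
-- The 0 < n hypothesis only justifies termination; it carries no computation.
def iterLoopA (k ans n : Int) (hn : 0 < n) : Int :=
  if _h : k - n ≤ 0 then ans
  else iterLoopA (k - n) (ans + 1) (n * 2) (by omega)
termination_by k.toNat
decreasing_by omega

def iteration_num (k : Int) : Int := iterLoopA k 0 1 (by norm_num)

-- ===== PORT B =====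
-- Python's k.bit_length() - 1 for k ≥ 2 is exactly Nat.log2 k.toNat (floor log2).
def iteration_num_alt (k : Int) : Int :=
  if k ≤ 1 then 0 else (Nat.log2 k.toNat : Int)

-- ===== PRECONDITION & SPEC =====
def Spec_iteration_num (k : Int) (out : Int) : Prop := out = iteration_num_alt k
instance (k : Int) (out : Int) : Decidable (Spec_iteration_num k out) := by unfold Spec_iteration_num; infer_instance

-- ===== CLAIM (what is proved, stated in full; the proofs are below) =====
def Claim_equal_iteration_num : Prop := ∀ (k : Int), Dom_iteration_num k → Spec_iteration_num k (iteration_num k)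

-- ===== LEMMAS AND PROOFS =====

-- the accumulator ans splits off additively
theorem iterLoopA_add : ∀ (K : Nat) (k ans n : Int) (hn : 0 < n), k.toNat ≤ K →
    iterLoopA k ans n hn = ans + iterLoopA k 0 n hn := by
  intro K
  induction K with
  | zero =>
    intro k ans n hn hK
    rw [iterLoopA]; conv_rhs => rw [iterLoopA]
    split
    · omega
    · omega
  | succ K ih =>
    intro k ans n hn hK
    rw [iterLoopA]; conv_rhs => rw [iterLoopA]
    split
    · omega
    · rw [ih (k - n) (ans + 1) (n * 2) (by omega) (by omega),
          ih (k - n) (0 + 1) (n * 2) (by omega) (by omega)]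
      omega

-- halving the step: if 2*m - 1 ≤ k ≤ 2*m (m = ⌈k/2⌉) the loop with step 2n on k equals the loop with step n on m
theorem iterLoopA_scale : ∀ (K : Nat) (k m ans n : Int) (hn : 0 < n) (h2n : 0 < n * 2),
    k.toNat ≤ K → 2 * m - 1 ≤ k → k ≤ 2 * m →
    iterLoopA k ans (n * 2) h2n = iterLoopA m ans n hn := by
  intro K
  induction K with
  | zero =>
    intro k m ans n hn h2n hK h1 h2
    rw [iterLoopA]; conv_rhs => rw [iterLoopA]
    split
    · split
      · rfl
      · omega
    · omega
  | succ K ih =>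
    intro k m ans n hn h2n hK h1 h2
    rw [iterLoopA]; conv_rhs => rw [iterLoopA]
    split
    · split
      · rfl
      · omega
    · split
      · omega
      · exact ih (k - n * 2) (m - n) (ans + 1) (n * 2) (by omega) (by omega)
          (by omega) (by omega) (by omega)

theorem iterLoopA_log2 : ∀ (K : Nat) (k : Int) (h1 : (0:Int) < 1), k.toNat ≤ K → 1 ≤ k →
    iterLoopA k 0 1 h1 = (Nat.log2 k.toNat : Int) := by
  intro K
  induction K with
  | zero => intro k h1 hK hk; omega
  | succ K ih =>
    intro k h1 hK hk
    rw [iterLoopA]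
    split
    · -- k = 1
      have : k = 1 := by omega
      subst this
      simp [Nat.log2]
    · -- k ≥ 2
      have hk2 : 2 ≤ k := by omega
      have hs : iterLoopA (k - 1) (0 + 1) (1 * 2) (by omega) =
          iterLoopA ((k.toNat / 2 : Nat) : Int) (0 + 1) 1 h1 := by
        exact iterLoopA_scale K (k - 1) ((k.toNat / 2 : Nat) : Int) (0 + 1) 1 h1 (by omega)
          (by omega) (by omega) (by omega)
      have hto : (((k.toNat / 2 : Nat) : Int)).toNat = k.toNat / 2 := by omega
      have hlog : (Nat.log2 k.toNat : Int) = 1 + (Nat.log2 (k.toNat / 2) : Int) := by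
        have h2 : 2 ≤ k.toNat := by omega
        have hp : 0 < Nat.log 2 k.toNat := Nat.log_pos (by norm_num) h2
        rw [Nat.log2_eq_log_two, Nat.log2_eq_log_two, Nat.log_div_base]
        omega
      calc iterLoopA (k - 1) (0 + 1) (1 * 2) (by omega)
          = iterLoopA ((k.toNat / 2 : Nat) : Int) (0 + 1) 1 h1 := hs
        _ = (0 + 1) + iterLoopA ((k.toNat / 2 : Nat) : Int) 0 1 h1 :=
            iterLoopA_add K ((k.toNat / 2 : Nat) : Int) (0 + 1) 1 h1 (by omega)
        _ = (0 + 1) + (Nat.log2 (k.toNat / 2) : Int) := by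
            rw [ih ((k.toNat / 2 : Nat) : Int) h1 (by omega) (by omega), hto]
        _ = (Nat.log2 k.toNat : Int) := by rw [hlog]; ring

-- ===== VERDICT (by name: the statement is the Claim_ definition above) =====
theorem iteration_num_spec : Claim_equal_iteration_num := by
  intro k _
  unfold Spec_iteration_num iteration_num iteration_num_alt
  by_cases h : k ≤ 1
  · rw [if_pos h, iterLoopA]
    split
    · rfl
    · omega
  · rw [if_neg h]
    exact iterLoopA_log2 k.toNat k (by norm_num) (le_refl _) (by omega)
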